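-- pv_equiv track=rewrite | github.com/krishnakumarbhat/plotly_code | can_kpi - Copy/a_persistence_layer/hdf_wrapper.py | _classify_subgroups
-- ===== SOURCE A (Python) =====
-- from typing import Any, Dict, List
--
-- def _classify_subgroups(subgroup_names: List[str]) -> Dict[str, List[str]]:
--     cats: Dict[str, List[str]] = {
--         "detection": [],
--         "alignment": [],
--         "header": [],
--         "status": [],
--         "capability": [],
--         "other": [],
--     }
--     for name in sorted(subgroup_names):
--         u = name.upper()
--         if "DETECTION" in u:
--             cats["detection"].append(name)
--         elif "ALIGNMENT" in u:
--             cats["alignment"].append(name)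
--         elif "HEADER" in u:
--             cats["header"].append(name)
--         elif "STATUS" in u:
--             cats["status"].append(name)
--         elif "CAPABILITY" in u:
--             cats["capability"].append(name)
--         else:
--             cats["other"].append(name)
--     return cats
-- ===== SOURCE B (Python) =====
-- from typing import Dict, List
--
-- _CATEGORIES = ("detection", "alignment", "header", "status", "capability", "other")
--
-- def _category(name: str) -> str:
--     u = name.upper()
--     for kw in ("DETECTION", "ALIGNMENT", "HEADER", "STATUS", "CAPABILITY"):
--         if kw in u:
--             return kw.lower()
--     return "other"
--
-- def _classify_subgroups(subgroup_names: List[str]) -> Dict[str, List[str]]: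
--     # one filtered, sorted bucket per category (no shared mutable state, no distribution loop)
--     return {cat: sorted(n for n in subgroup_names if _category(n) == cat)
--             for cat in _CATEGORIES}
-- ===== Notes on version B (the rewrite author's own statement) =====
-- stated objective: simpler
-- what changed: A sorts the whole input once and distributes each name into mutable buckets via an elif chain; B inverts the loops: a dict comprehension builds each category's bucket independently by filtering the input for that category and sorting the filtered list, with no mutation or distribution loop.
import Mathlib
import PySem

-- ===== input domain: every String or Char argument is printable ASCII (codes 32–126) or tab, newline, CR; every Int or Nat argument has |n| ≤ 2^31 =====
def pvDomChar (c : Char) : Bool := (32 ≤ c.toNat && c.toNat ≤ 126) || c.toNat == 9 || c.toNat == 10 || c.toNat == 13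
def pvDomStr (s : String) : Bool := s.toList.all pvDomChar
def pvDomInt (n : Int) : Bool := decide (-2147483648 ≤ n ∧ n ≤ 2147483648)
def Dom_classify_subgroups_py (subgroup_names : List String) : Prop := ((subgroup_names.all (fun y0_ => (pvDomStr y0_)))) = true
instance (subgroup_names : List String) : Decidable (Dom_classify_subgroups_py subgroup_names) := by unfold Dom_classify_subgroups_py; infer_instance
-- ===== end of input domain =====

-- B replaces A's sort-then-distribute mutation loop by a dict comprehension building each
-- category's bucket independently (filter that category, then sort it): a simpler, loop-inverted
-- decomposition of the same task.

-- ===== PORT A =====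
def classify_subgroups_py (subgroup_names : List String) : List (String × List String) :=
  let cats : PySem.Dict String (List String) :=
    PySem.Dict.mk [("detection", []), ("alignment", []), ("header", []),
                   ("status", []), ("capability", []), ("other", [])]
  let cats := (PySem.List.sorted subgroup_names (fun x => x) false).foldl
    (fun cats name =>
      let u := PySem.Str.upper name
      if PySem.Str.isIn "DETECTION" u then cats.modify "detection" [] (fun l => l ++ [name])
      else if PySem.Str.isIn "ALIGNMENT" u then cats.modify "alignment" [] (fun l => l ++ [name])
      else if PySem.Str.isIn "HEADER" u then cats.modify "header" [] (fun l => l ++ [name])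
      else if PySem.Str.isIn "STATUS" u then cats.modify "status" [] (fun l => l ++ [name])
      else if PySem.Str.isIn "CAPABILITY" u then cats.modify "capability" [] (fun l => l ++ [name])
      else cats.modify "other" [] (fun l => l ++ [name])) cats
  cats.items

-- ===== PORT B =====
def pvCategories : List String :=
  ["detection", "alignment", "header", "status", "capability", "other"]

-- Source B's _category: the 'for kw in (…): if kw in u: return kw.lower()' loop
def pvCatLoop : List String → String → String
  | [], _ => "other"
  | kw :: rest, u => if PySem.Str.isIn kw u then PySem.Str.lower kw else pvCatLoop rest u

def pvCategory (name : String) : String :=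
  pvCatLoop ["DETECTION", "ALIGNMENT", "HEADER", "STATUS", "CAPABILITY"]
    (PySem.Str.upper name)

def classify_subgroups_py_alt (subgroup_names : List String) : List (String × List String) :=
  -- the dict comprehension: one (cat, sorted filtered bucket) pair per category
  (PySem.Dict.mk
    (pvCategories.map (fun cat =>
      (cat, PySem.List.sorted (subgroup_names.filter (fun n => pvCategory n == cat))
              (fun x => x) false)))).items

-- ===== PRECONDITION & SPEC =====
def Spec_classify_subgroups_py (subgroup_names : List String) (out : List (String × List String)) : Prop := out = classify_subgroups_py_alt subgroup_names
instance (subgroup_names : List String) (out : List (String × List String)) : Decidable (Spec_classify_subgroups_py subgroup_names out) := by unfold Spec_classify_subgroups_py; infer_instance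

-- ===== CLAIM (what is proved, stated in full; the proofs are below) =====
def Claim_equal_classify_subgroups_py : Prop := ∀ (subgroup_names : List String), Dom_classify_subgroups_py subgroup_names → Spec_classify_subgroups_py subgroup_names (classify_subgroups_py subgroup_names)

-- ===== LEMMAS AND PROOFS =====

def pvStep (d : PySem.Dict String (List String)) (name : String) : PySem.Dict String (List String) :=
  d.modify (pvCategory name) [] (fun l => l ++ [name])

def pvD0 : PySem.Dict String (List String) :=
  PySem.Dict.mk [("detection", []), ("alignment", []), ("header", []),
                 ("status", []), ("capability", []), ("other", [])]

lemma pvStepA_eq :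
    (fun (cats : PySem.Dict String (List String)) (name : String) =>
      let u := PySem.Str.upper name
      if PySem.Str.isIn "DETECTION" u then cats.modify "detection" [] (fun l => l ++ [name])
      else if PySem.Str.isIn "ALIGNMENT" u then cats.modify "alignment" [] (fun l => l ++ [name])
      else if PySem.Str.isIn "HEADER" u then cats.modify "header" [] (fun l => l ++ [name])
      else if PySem.Str.isIn "STATUS" u then cats.modify "status" [] (fun l => l ++ [name])
      else if PySem.Str.isIn "CAPABILITY" u then cats.modify "capability" [] (fun l => l ++ [name])
      else cats.modify "other" [] (fun l => l ++ [name])) = pvStep := by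
  funext d n
  simp only [pvStep, pvCategory, pvCatLoop]
  split_ifs <;> rfl

lemma pvCategory_mem (n : String) : pvCategory n ∈ pvCategories := by
  simp only [pvCategory, pvCatLoop, pvCategories]
  split_ifs <;> decide

lemma pvFold_keys (l : List String) :
    (l.foldl pvStep pvD0).keys = pvCategories := by
  have h : (l.foldl (fun d x => d.modify (pvCategory x) [] (fun v => v ++ [x])) pvD0).keys
      = PySem.Set.update pvD0.keys (l.map pvCategory) :=
    PySem.Dict.keys_foldl_modify_key (f := fun _ x => (fun v => v ++ [x])) ..
  have hstep : pvStep = fun d x => d.modify (pvCategory x) [] (fun v => v ++ [x]) := rfl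
  rw [hstep, h, PySem.Set.update_eq_append_filter]
  have hnil : (PySem.Set.ofList (l.map pvCategory)).filter
      (fun y => !(PySem.Set.contains pvD0.keys y)) = [] := by
    rw [List.filter_eq_nil_iff]
    intro a ha
    have ha' : a ∈ l.map pvCategory := by simpa [PySem.Set.mem_ofList] using ha
    rcases List.mem_map.mp ha' with ⟨n, _, rfl⟩
    have hmem : pvCategory n ∈ pvD0.keys := by
      have h := pvCategory_mem n
      simpa [pvD0, PySem.Dict.keys, pvCategories] using h
    simp [PySem.Set.contains_eq_listContains, hmem]
  rw [hnil]
  simp [pvD0, PySem.Dict.keys, pvCategories]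

lemma pvFold_nodup (l : List String) : (l.foldl pvStep pvD0).keys.Nodup := by
  rw [pvFold_keys]; decide

lemma pvFold_getD (l : List String) (c : String) :
    (l.foldl pvStep pvD0).getD c [] = pvD0.getD c [] ++ l.filter (fun n => pvCategory n == c) := by
  have hm : l.foldl pvStep pvD0
      = (l.map (fun n => (pvCategory n, n))).foldl
          (fun d p => d.modify p.1 [] (fun v => v ++ [p.2])) pvD0 := by
    rw [List.foldl_map]; rfl
  rw [hm, PySem.Dict.getD_foldl_modify_append]
  congr 1
  rw [List.filter_map, List.map_map]
  simp only [Function.comp_def, List.map_id']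

lemma pvFold_items (l : List String) :
    (l.foldl pvStep pvD0).items
      = pvCategories.map (fun k => (k, l.filter (fun n => pvCategory n == k))) := by
  rw [PySem.Dict.items_eq_map_keys _ (pvFold_nodup l) [], pvFold_keys]
  apply List.map_congr_left
  intro k hk
  rw [pvFold_getD]
  have h0 : pvD0.getD k [] = [] := by
    fin_cases hk <;> rfl
  rw [h0, List.nil_append]

lemma pvFilter_sorted (p : String → Bool) (l : List String) :
    (PySem.List.sorted l (fun x => x) false).filter p
      = PySem.List.sorted (l.filter p) (fun x => x) false := by
  have h1 := PySem.List.sorted_perm (xs := l.filter p) (key := fun x => x) (rev := false)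
  have h2 := (PySem.List.sorted_perm (xs := l) (key := fun x => x) (rev := false)).filter p
  have s1 : ((PySem.List.sorted l (fun x => x) false).filter p).Pairwise (· ≤ ·) :=
    List.Pairwise.filter p (PySem.List.sorted_pairwise ..)
  have s2 : (PySem.List.sorted (l.filter p) (fun x => x) false).Pairwise (· ≤ ·) :=
    PySem.List.sorted_pairwise ..
  exact List.Perm.eq_of_pairwise' s1 s2 (h2.trans h1.symm)

-- ===== VERDICT (by name: the statement is the Claim_ definition above) =====
theorem classify_subgroups_py_spec : Claim_equal_classify_subgroups_py := by
  intro ls _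
  show classify_subgroups_py ls = classify_subgroups_py_alt ls
  unfold classify_subgroups_py classify_subgroups_py_alt
  rw [pvStepA_eq]
  show (List.foldl pvStep pvD0 _).items
      = (PySem.Dict.mk (pvCategories.map (fun cat =>
          (cat, PySem.List.sorted (ls.filter (fun n => pvCategory n == cat)) (fun x => x) false)))).items
  rw [pvFold_items]
  show _ = List.map (fun cat =>
      (cat, PySem.List.sorted (List.filter (fun n => pvCategory n == cat) ls) (fun x => x) false))
      pvCategories
  apply List.map_congr_left
  intro k _
  rw [pvFilter_sorted]
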